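-- pv_equiv track=rewrite | github.com/Alexd-y/argus | backend/src/reports/valhalla_report_context.py | _raw_keys_hint_flags
-- ===== SOURCE A (Python) =====
-- _ROBOTS_KEY_HINTS = frozenset({"robots", "robots_txt", "robotstxt"})
--
-- _SITEMAP_KEY_HINTS = frozenset({"sitemap", "sitemap_xml", "sitemapxml"})
--
-- _TLS_ARTIFACT_HINTS = frozenset({"testssl", "sslscan", "tls", "ssl"})
--
-- _DEP_ARTIFACT_HINTS = frozenset(
--     {
--         "trivy",
--         "recon_trivy",
--         "safety",
--         "pip_audit",
--         "npm_audit",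
--         "yarn_lock",
--         "pnpm_lock",
--         "manifest",
--         "package_lock",
--         "package_json",
--         "package.json",
--         "requirements",
--         "poetry",
--         "composer",
--         "go.mod",
--         "go_sum",
--     }
-- )
--
-- _HTTP_HEADER_ARTIFACT_HINTS = frozenset(
--     {"headers", "http_audit", "httpx", "nikto", "response", "raw_http", "curl"}
-- )
--
-- _EMAIL_FALLBACK_ARTIFACT_HINTS = frozenset(
--     {"theharvester", "email", "contact", "html", "javascript", "js", "sitemap", "robots"}
-- )
--
-- def _artifact_name_matches(key: str, hints: frozenset[str]) -> bool:
--     base = key.rsplit("/", 1)[-1].lower()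
--     name_no_ext = base.rsplit(".", 1)[0] if "." in base else base
--     parts = name_no_ext.split("_")
--     tail = parts[-1] if parts else name_no_ext
--     for h in hints:
--         if h in base or h in tail:
--             return True
--     if len(parts) >= 3:
--         at = parts[2]
--         for h in hints:
--             if h in at:
--                 return True
--     return False
--
-- def _raw_has_port_scan_artifact_keys(raw_artifact_keys: list[tuple[str, str]]) -> bool:
--     for k, _ in raw_artifact_keys:
--         kl = k.lower()
--         if any(x in kl for x in ("nmap", "naabu", "masscan")):
--             return True
--     return False
--
-- def _raw_keys_hint_flags(raw_artifact_keys: list[tuple[str, str]]) -> dict[str, bool]: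
--     keys_low = " ".join(k.lower() for k, _ in raw_artifact_keys)
--     return {
--         "has_whatweb": "whatweb" in keys_low,
--         "has_robots": any(_artifact_name_matches(k, _ROBOTS_KEY_HINTS) for k, _ in raw_artifact_keys),
--         "has_sitemap": any(_artifact_name_matches(k, _SITEMAP_KEY_HINTS) for k, _ in raw_artifact_keys),
--         "has_tls": any(_artifact_name_matches(k, _TLS_ARTIFACT_HINTS) for k, _ in raw_artifact_keys),
--         "has_harvester": "theharvester" in keys_low,
--         "has_headers": any(_artifact_name_matches(k, _HTTP_HEADER_ARTIFACT_HINTS) for k, _ in raw_artifact_keys),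
--         "has_dependency": any(_artifact_name_matches(k, _DEP_ARTIFACT_HINTS) for k, _ in raw_artifact_keys),
--         "has_email_fallback": any(
--             _artifact_name_matches(k, _EMAIL_FALLBACK_ARTIFACT_HINTS) for k, _ in raw_artifact_keys
--         ),
--         "has_ports": _raw_has_port_scan_artifact_keys(raw_artifact_keys),
--     }
-- ===== SOURCE B (Python) =====
-- _ROBOTS = frozenset({"robots", "robots_txt", "robotstxt"})
-- _SITEMAP = frozenset({"sitemap", "sitemap_xml", "sitemapxml"})
-- _TLS = frozenset({"testssl", "sslscan", "tls", "ssl"})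
-- _DEP = frozenset({
--     "trivy", "recon_trivy", "safety", "pip_audit", "npm_audit", "yarn_lock",
--     "pnpm_lock", "manifest", "package_lock", "package_json", "package.json",
--     "requirements", "poetry", "composer", "go.mod", "go_sum",
-- })
-- _HDR = frozenset({"headers", "http_audit", "httpx", "nikto", "response", "raw_http", "curl"})
-- _EMAIL = frozenset({"theharvester", "email", "contact", "html", "javascript", "js", "sitemap", "robots"})
--
--
-- def _raw_keys_hint_flags(raw_artifact_keys: list[tuple[str, str]]) -> dict[str, bool]:
--     # Single pass: each key is lowered and decomposed once, and all nine flags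
--     # are OR-ed in as the keys stream by (no joined string, no per-flag rescans).
--     whatweb = robots = sitemap = tls = harvester = headers = dep = email = ports = False
--     for k, _ in raw_artifact_keys:
--         kl = k.lower()
--         base = kl.rsplit("/", 1)[-1]
--         name_no_ext = base.rsplit(".", 1)[0] if "." in base else base
--         parts = name_no_ext.split("_")
--         tail = parts[-1]
--         third = parts[2] if len(parts) >= 3 else None
--
--         def hit(hints):
--             return any(
--                 h in base or h in tail or (third is not None and h in third)
--                 for h in hints
--             )
--
--         whatweb = whatweb or "whatweb" in kl
--         harvester = harvester or "theharvester" in kl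
--         ports = ports or "nmap" in kl or "naabu" in kl or "masscan" in kl
--         robots = robots or hit(_ROBOTS)
--         sitemap = sitemap or hit(_SITEMAP)
--         tls = tls or hit(_TLS)
--         headers = headers or hit(_HDR)
--         dep = dep or hit(_DEP)
--         email = email or hit(_EMAIL)
--     return {
--         "has_whatweb": whatweb,
--         "has_robots": robots,
--         "has_sitemap": sitemap,
--         "has_tls": tls,
--         "has_harvester": harvester,
--         "has_headers": headers,
--         "has_dependency": dep,
--         "has_email_fallback": email,
--         "has_ports": ports,
--     }
-- ===== Notes on version B (the rewrite author's own statement) =====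
-- stated objective: alternative
-- what changed: A builds a space-joined lowered key string and makes nine separate scans (one any() per hint set plus two substring tests on the joined string); B makes a single pass over the keys, lowering and decomposing each key once and OR-ing all nine flags into an accumulator, with no joined string and no rescans.
import Mathlib
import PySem

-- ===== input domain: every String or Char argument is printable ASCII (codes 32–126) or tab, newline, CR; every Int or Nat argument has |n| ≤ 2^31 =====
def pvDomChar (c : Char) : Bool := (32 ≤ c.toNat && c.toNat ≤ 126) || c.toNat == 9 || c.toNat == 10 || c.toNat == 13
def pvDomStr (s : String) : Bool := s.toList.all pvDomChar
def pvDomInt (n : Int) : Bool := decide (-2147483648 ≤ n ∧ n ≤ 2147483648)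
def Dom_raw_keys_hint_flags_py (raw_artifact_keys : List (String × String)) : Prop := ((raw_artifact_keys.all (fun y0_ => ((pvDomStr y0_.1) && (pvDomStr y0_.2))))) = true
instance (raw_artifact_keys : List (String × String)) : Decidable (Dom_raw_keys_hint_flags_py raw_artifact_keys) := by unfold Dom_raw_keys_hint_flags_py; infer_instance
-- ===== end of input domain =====

-- B replaces A's nine separate passes (a joined lowered string plus one `any` scan per hint set)
-- by a single pass that lowers and decomposes each key once and ORs all nine flags in (objective: alternative).

-- ===== PORT A =====
-- hand port of key.rsplit("/", 1)[-1]: the characters after the LAST '/' (the whole string if none) — exact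
def pvRsplitSlashLast (cs : List Char) : List Char := (cs.reverse.takeWhile (fun c => c != '/')).reverse
-- hand port of base.rsplit(".", 1)[0] when '.' ∈ base: the characters before the LAST '.' — exact
def pvRsplitDotHead (cs : List Char) : List Char := ((cs.reverse.dropWhile (fun c => c != '.')).drop 1).reverse

-- the frozenset hint constants as lists; A's loops over them only test existence, so iteration order is irrelevant
def pvRobotsHints : List String := ["robots", "robots_txt", "robotstxt"]
def pvSitemapHints : List String := ["sitemap", "sitemap_xml", "sitemapxml"]
def pvTlsHints : List String := ["testssl", "sslscan", "tls", "ssl"]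
def pvDepHints : List String := ["trivy", "recon_trivy", "safety", "pip_audit", "npm_audit", "yarn_lock", "pnpm_lock", "manifest", "package_lock", "package_json", "package.json", "requirements", "poetry", "composer", "go.mod", "go_sum"]
def pvHdrHints : List String := ["headers", "http_audit", "httpx", "nikto", "response", "raw_http", "curl"]
def pvEmailHints : List String := ["theharvester", "email", "contact", "html", "javascript", "js", "sitemap", "robots"]

-- port of _artifact_name_matches
def pvArtifactNameMatches (key : String) (hints : List String) : Bool :=
  let base := PySem.Chars.lower (pvRsplitSlashLast key.toList)
  let nameNoExt := if PySem.Chars.isIn ['.'] base then pvRsplitDotHead base else base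
  let parts := PySem.Chars.splitOn nameNoExt ['_']
  let tail := match parts.getLast? with | some t => t | none => nameNoExt
  if hints.any (fun h => PySem.Chars.isIn h.toList base || PySem.Chars.isIn h.toList tail) then true
  else if 3 ≤ parts.length then
    hints.any (fun h => PySem.Chars.isIn h.toList (parts.getD 2 []))
  else false

-- port of _raw_has_port_scan_artifact_keys
def pvRawHasPortScan (raw_artifact_keys : List (String × String)) : Bool :=
  raw_artifact_keys.any (fun p =>
    let kl := PySem.Chars.lower p.1.toList
    ["nmap", "naabu", "masscan"].any (fun x => PySem.Chars.isIn x.toList kl))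

def raw_keys_hint_flags_py (raw_artifact_keys : List (String × String)) : List (String × Bool) :=
  let keys_low := PySem.Chars.join [' '] (raw_artifact_keys.map (fun p => PySem.Chars.lower p.1.toList))
  [("has_whatweb", PySem.Chars.isIn "whatweb".toList keys_low),
   ("has_robots", raw_artifact_keys.any (fun p => pvArtifactNameMatches p.1 pvRobotsHints)),
   ("has_sitemap", raw_artifact_keys.any (fun p => pvArtifactNameMatches p.1 pvSitemapHints)),
   ("has_tls", raw_artifact_keys.any (fun p => pvArtifactNameMatches p.1 pvTlsHints)),
   ("has_harvester", PySem.Chars.isIn "theharvester".toList keys_low),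
   ("has_headers", raw_artifact_keys.any (fun p => pvArtifactNameMatches p.1 pvHdrHints)),
   ("has_dependency", raw_artifact_keys.any (fun p => pvArtifactNameMatches p.1 pvDepHints)),
   ("has_email_fallback", raw_artifact_keys.any (fun p => pvArtifactNameMatches p.1 pvEmailHints)),
   ("has_ports", pvRawHasPortScan raw_artifact_keys)]

-- ===== PORT B =====
structure PvFlags where
  whatweb : Bool
  robots : Bool
  sitemap : Bool
  tls : Bool
  harvester : Bool
  headers : Bool
  dep : Bool
  email : Bool
  ports : Bool
deriving Repr, DecidableEq

-- Source B's inner `hit`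
def pvHitB (base tail : List Char) (third : Option (List Char)) (hints : List String) : Bool :=
  hints.any (fun h =>
    PySem.Chars.isIn h.toList base || PySem.Chars.isIn h.toList tail ||
      (match third with | some t => PySem.Chars.isIn h.toList t | none => false))

-- one iteration of Source B's loop body
def pvStepB (f : PvFlags) (p : String × String) : PvFlags :=
  let kl := PySem.Chars.lower p.1.toList
  let base := pvRsplitSlashLast kl
  let nameNoExt := if PySem.Chars.isIn ['.'] base then pvRsplitDotHead base else base
  let parts := PySem.Chars.splitOn nameNoExt ['_']
  let tail := match parts.getLast? with | some t => t | none => nameNoExt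
  let third := if 3 ≤ parts.length then some (parts.getD 2 []) else none
  { whatweb := f.whatweb || PySem.Chars.isIn "whatweb".toList kl,
    robots := f.robots || pvHitB base tail third pvRobotsHints,
    sitemap := f.sitemap || pvHitB base tail third pvSitemapHints,
    tls := f.tls || pvHitB base tail third pvTlsHints,
    harvester := f.harvester || PySem.Chars.isIn "theharvester".toList kl,
    headers := f.headers || pvHitB base tail third pvHdrHints,
    dep := f.dep || pvHitB base tail third pvDepHints,
    email := f.email || pvHitB base tail third pvEmailHints,
    ports := f.ports || PySem.Chars.isIn "nmap".toList kl || PySem.Chars.isIn "naabu".toList kl || PySem.Chars.isIn "masscan".toList kl }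

def raw_keys_hint_flags_py_alt (raw_artifact_keys : List (String × String)) : List (String × Bool) :=
  let f := raw_artifact_keys.foldl pvStepB ⟨false, false, false, false, false, false, false, false, false⟩
  [("has_whatweb", f.whatweb),
   ("has_robots", f.robots),
   ("has_sitemap", f.sitemap),
   ("has_tls", f.tls),
   ("has_harvester", f.harvester),
   ("has_headers", f.headers),
   ("has_dependency", f.dep),
   ("has_email_fallback", f.email),
   ("has_ports", f.ports)]

-- ===== PRECONDITION & SPEC =====
def Spec_raw_keys_hint_flags_py (raw_artifact_keys : List (String × String)) (out : List (String × Bool)) : Prop := out = raw_keys_hint_flags_py_alt raw_artifact_keys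
instance (raw_artifact_keys : List (String × String)) (out : List (String × Bool)) : Decidable (Spec_raw_keys_hint_flags_py raw_artifact_keys out) := by unfold Spec_raw_keys_hint_flags_py; infer_instance

-- ===== CLAIM (what is proved, stated in full; the proofs are below) =====
def Claim_equal_raw_keys_hint_flags_py : Prop := ∀ (raw_artifact_keys : List (String × String)), Dom_raw_keys_hint_flags_py raw_artifact_keys → Spec_raw_keys_hint_flags_py raw_artifact_keys (raw_keys_hint_flags_py raw_artifact_keys)

-- ===== LEMMAS AND PROOFS =====

-- per-key predicates that Source B's single loop ORs into its accumulator
def pvKeyW (p : String × String) : Bool := PySem.Chars.isIn "whatweb".toList (PySem.Chars.lower p.1.toList)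
def pvKeyH (p : String × String) : Bool := PySem.Chars.isIn "theharvester".toList (PySem.Chars.lower p.1.toList)
def pvKeyP (p : String × String) : Bool :=
  let kl := PySem.Chars.lower p.1.toList
  PySem.Chars.isIn "nmap".toList kl || PySem.Chars.isIn "naabu".toList kl || PySem.Chars.isIn "masscan".toList kl
def pvKeyHit (hints : List String) (p : String × String) : Bool :=
  let kl := PySem.Chars.lower p.1.toList
  let base := pvRsplitSlashLast kl
  let nameNoExt := if PySem.Chars.isIn ['.'] base then pvRsplitDotHead base else base
  let parts := PySem.Chars.splitOn nameNoExt ['_']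
  let tail := match parts.getLast? with | some t => t | none => nameNoExt
  let third := if 3 ≤ parts.length then some (parts.getD 2 []) else none
  pvHitB base tail third hints

-- the fold of Source B's loop, characterised componentwise
lemma pv_foldB (keys : List (String × String)) (f0 : PvFlags) :
    keys.foldl pvStepB f0 =
      ⟨f0.whatweb || keys.any pvKeyW,
       f0.robots || keys.any (pvKeyHit pvRobotsHints),
       f0.sitemap || keys.any (pvKeyHit pvSitemapHints),
       f0.tls || keys.any (pvKeyHit pvTlsHints),
       f0.harvester || keys.any pvKeyH,
       f0.headers || keys.any (pvKeyHit pvHdrHints),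
       f0.dep || keys.any (pvKeyHit pvDepHints),
       f0.email || keys.any (pvKeyHit pvEmailHints),
       f0.ports || keys.any pvKeyP⟩ := by
  induction keys generalizing f0 with
  | nil => simp
  | cons x xs ih =>
    rw [List.foldl_cons, ih]
    simp [pvStepB, pvKeyW, pvKeyH, pvKeyP, pvKeyHit, Bool.or_assoc]

-- any distributes over a pointwise ||
lemma pv_any_or {α : Type} (l : List α) (p q : α → Bool) :
    (l.any fun x => p x || q x) = (l.any p || l.any q) := by
  induction l with
  | nil => simp
  | cons x xs ih => simp [ih, Bool.or_assoc, Bool.or_left_comm]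

lemma pv_lowerChar_slash (c : Char) : (PySem.Chars.lowerChar c != '/') = (c != '/') := by
  simp only [PySem.Chars.lowerChar, PySem.Chars.isupper]
  split_ifs with h
  · have h1 : 65 ≤ c.toNat ∧ c.toNat ≤ 90 := by
      simp only [Bool.and_eq_true, decide_eq_true_eq] at h
      exact ⟨h.1, h.2⟩
    have hv : (c.toNat + 32).isValidChar := Or.inl (by omega)
    have h2 : (Char.ofNat (c.toNat + 32)).toNat = c.toNat + 32 := by
      rw [Char.toNat_ofNat, if_pos hv]
    have h47 : ('/' : Char).toNat = 47 := by decide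
    have hne1 : Char.ofNat (c.toNat + 32) ≠ '/' := by
      intro he
      have := congrArg Char.toNat he
      rw [h2, h47] at this
      omega
    have hne2 : c ≠ '/' := by
      intro he
      rw [he] at h1
      rw [h47] at h1
      omega
    rw [Bool.eq_iff_iff, bne_iff_ne, bne_iff_ne]
    exact ⟨fun _ => hne2, fun _ => hne1⟩
  · rfl

lemma pv_rsplit_lower (cs : List Char) :
    pvRsplitSlashLast (PySem.Chars.lower cs) = PySem.Chars.lower (pvRsplitSlashLast cs) := by
  have hp : ((fun c => c != '/') ∘ PySem.Chars.lowerChar) = (fun c => c != '/') := by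
    funext c
    exact pv_lowerChar_slash c
  unfold pvRsplitSlashLast PySem.Chars.lower
  rw [← List.map_reverse, List.takeWhile_map, hp, List.map_reverse]

-- per key, A's matcher equals Source B's inline hit test on the pre-lowered key
lemma pv_if_bool (x y : Bool) : (if x then true else y) = (x || y) := by
  cases x <;> simp

lemma pv_if_any (l : List String) (a b c2 : String → Bool) :
    (if (l.any fun h => a h || b h) then true else l.any c2) = l.any (fun h => a h || b h || c2 h) := by
  rw [pv_if_bool, ← pv_any_or]

lemma pv_match_eq (hints : List String) (p : String × String) :
    pvArtifactNameMatches p.1 hints = pvKeyHit hints p := by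
  simp only [pvArtifactNameMatches, pvKeyHit, pvHitB]
  rw [pv_rsplit_lower]
  generalize PySem.Chars.lower (pvRsplitSlashLast p.1.toList) = base
  generalize (if PySem.Chars.isIn ['.'] base then pvRsplitDotHead base else base) = nameNoExt
  generalize PySem.Chars.splitOn nameNoExt ['_'] = parts
  generalize (match parts.getLast? with | some t => t | none => nameNoExt) = tail
  by_cases h3 : 3 ≤ parts.length
  · simp only [h3, if_true]
    exact pv_if_any hints _ _ _
  · simp only [if_neg h3, pv_if_bool, Bool.or_false]

lemma pv_prefix_through (pat l1 l2 : List Char) (c : Char) (hc : c ∉ pat)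
    (h : pat <+: l1 ++ c :: l2) : pat <+: l1 := by
  induction l1 generalizing pat with
  | nil =>
    cases pat with
    | nil => exact List.nil_prefix
    | cons p ps =>
      rw [List.nil_append] at h
      obtain ⟨h1, _⟩ := List.cons_prefix_cons.mp h
      exact absurd (h1 ▸ List.mem_cons_self) hc
  | cons a l1' ih =>
    cases pat with
    | nil => exact List.nil_prefix
    | cons p ps =>
      rw [List.cons_append] at h
      obtain ⟨h1, h2⟩ := List.cons_prefix_cons.mp h
      have := ih ps (fun hm => hc (List.mem_cons_of_mem _ hm)) h2
      exact List.cons_prefix_cons.mpr ⟨h1, this⟩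

lemma pv_infix_split (pat l1 l2 : List Char) (c : Char) (hc : c ∉ pat) :
    pat <:+: (l1 ++ c :: l2) ↔ (pat <:+: l1 ∨ pat <:+: l2) := by
  constructor
  · intro h
    induction l1 with
    | nil =>
      rw [List.nil_append] at h
      rcases List.infix_cons_iff.mp h with hp | hi
      · cases pat with
        | nil => exact Or.inl List.nil_infix
        | cons p ps =>
          obtain ⟨h1, _⟩ := List.cons_prefix_cons.mp hp
          exact absurd (h1 ▸ List.mem_cons_self) hc
      · exact Or.inr hi
    | cons a l1' ih =>
      rw [List.cons_append] at h
      rcases List.infix_cons_iff.mp h with hp | hi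
      · exact Or.inl (pv_prefix_through pat (a :: l1') l2 c hc (by rwa [List.cons_append])).isInfix
      · rcases ih hi with h1 | h2
        · exact Or.inl (List.infix_cons_iff.mpr (Or.inr h1))
        · exact Or.inr h2
  · rintro (h | h)
    · exact h.trans (List.prefix_append l1 (c :: l2)).isInfix
    · exact h.trans ((List.suffix_cons c l2).trans (List.suffix_append l1 (c :: l2))).isInfix

lemma pv_isIn_append_cons (pat l1 l2 : List Char) (c : Char) (hc : c ∉ pat) :
    PySem.Chars.isIn pat (l1 ++ c :: l2) = (PySem.Chars.isIn pat l1 || PySem.Chars.isIn pat l2) := by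
  rw [Bool.eq_iff_iff]
  simp only [Bool.or_eq_true, PySem.Chars.isIn_iff_infix]
  exact pv_infix_split pat l1 l2 c hc

-- a space-free nonempty pattern is in the space-joined list iff it is in one of the pieces
lemma pv_isIn_join (pat : List Char) (hc : ' ' ∉ pat) (hne : pat ≠ []) (ls : List (List Char)) :
    PySem.Chars.isIn pat (PySem.Chars.join [' '] ls) = ls.any (fun l => PySem.Chars.isIn pat l) := by
  induction ls with
  | nil =>
    rw [PySem.Chars.join_nil, Bool.eq_iff_iff]
    simp [PySem.Chars.isIn_iff_infix, List.infix_nil, hne]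
  | cons x xs ih =>
    cases xs with
    | nil => rw [PySem.Chars.join_singleton]; simp
    | cons y r =>
      rw [PySem.Chars.join_cons_cons, List.append_assoc, List.singleton_append,
        pv_isIn_append_cons pat x _ ' ' hc, ih, List.any_cons]
      simp [List.any_cons]

-- ===== VERDICT (by name: the statement is the Claim_ definition above) =====
theorem raw_keys_hint_flags_py_spec : Claim_equal_raw_keys_hint_flags_py := by
  intro keys _
  unfold Spec_raw_keys_hint_flags_py
  simp only [raw_keys_hint_flags_py, raw_keys_hint_flags_py_alt]
  rw [pv_foldB]
  simp only [Bool.false_or]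
  have hjoin : ∀ (pat : List Char), ' ' ∉ pat → pat ≠ [] →
      PySem.Chars.isIn pat (PySem.Chars.join [' '] (keys.map (fun p => PySem.Chars.lower p.1.toList)))
        = keys.any (fun p => PySem.Chars.isIn pat (PySem.Chars.lower p.1.toList)) := by
    intro pat h1 h2
    rw [pv_isIn_join pat h1 h2, List.any_map]
    rfl
  have hW : PySem.Chars.isIn "whatweb".toList (PySem.Chars.join [' '] (keys.map (fun p => PySem.Chars.lower p.1.toList))) = keys.any pvKeyW := by
    rw [hjoin _ (by decide) (by decide)]; rfl
  have hH : PySem.Chars.isIn "theharvester".toList (PySem.Chars.join [' '] (keys.map (fun p => PySem.Chars.lower p.1.toList))) = keys.any pvKeyH := by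
    rw [hjoin _ (by decide) (by decide)]; rfl
  have hHit : ∀ hints : List String,
      (keys.any fun p => pvArtifactNameMatches p.1 hints) = keys.any (pvKeyHit hints) := by
    intro hints
    congr 1
    funext p
    exact pv_match_eq hints p
  have hP : pvRawHasPortScan keys = keys.any pvKeyP := by
    unfold pvRawHasPortScan pvKeyP
    congr 1
    funext p
    simp [Bool.or_assoc]
  rw [hW, hH, hHit, hHit, hHit, hHit, hHit, hHit, hP]
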